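/- GENERATED by farm/worked/mk_tree_copies.py from farm/worked/decode_residue.COMPOSITION/Proof.lean (a worked proof of the farm's unit `decode_residue.COMPOSITION`,
   accepted by the verdict) — do not edit. -/
import Vorbis.Spec.Units.decode_residue_COMPOSITION

/-
  THE COMPOSITION OF decode_residue's 11 SEGMENTS (S7's proof, in the farm's format): every exit assertion of `Seg1 … Seg11` is an
  entry assertion, and the loop variables the exits carry give the measures. Pure logic: `ReachVia.trans` and induction; no
  machine step.

      path A   pass loop 2163: induction on `7 − pass` (`a24`); the `while` of pass 0 crosses .4 / .5 (.6 / .7): induction on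
               `PRD − pcount` (`a10`, `a17`): a return to DECODE comes with a larger `pcount < PRD`
      path B   pass loop 2257: induction on `7 − pass`; inside one pass the measure `4·(PRD − pcount) + stage`
               (stage: j-loop 2261 = 3, hand-over = 2, j-loop 2279 = 1, latch of 2278 = 0)
-/
namespace Vorbis.Spec.Worked.decode_residue_COMPOSITION
open Vorbis.Spec.decode_residue_COMPOSITION (Statement)
open X86 X86.User Asan Vorbis Vorbis.Spec Vorbis.Spec.DecodeResidue

/-- The segments compose: from the function's entry the machine reaches the function's `Returned`. -/
theorem decode_residue_composes_w (Lay : Layout) (μ : Microarch) (u₀ : State)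
    (h1 : Seg1 Lay μ u₀) (h2 : Seg2 Lay μ u₀) (h3 : Seg3 Lay μ u₀) (h4 : Seg4 Lay μ u₀) (h5 : Seg5 Lay μ u₀)
    (h6 : Seg6 Lay μ u₀) (h7 : Seg7 Lay μ u₀) (h8 : Seg8 Lay μ u₀) (h9 : Seg9 Lay μ u₀) (h10 : Seg10 Lay μ u₀)
    (h11 : Seg11 Lay μ u₀) (g : G) (hent : Entered u₀ g) :
    ReachVia Lay μ WayInv g.e (Returned (conv u₀) g.spec g.e g.ret) := by
  obtain ⟨e32, e36, e37, e38, e39⟩ := h11 g hent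
  obtain ⟨h3a, h3b⟩ := h3 g hent
  obtain ⟨h4a, h4b⟩ := h4 g hent
  obtain ⟨h6a, h6b⟩ := h6 g hent
  obtain ⟨h8a, h8b, h8c⟩ := h8 g hent
  have h5' := h5 g hent
  have h7' := h7 g hent
  have h9' := h9 g hent
  have h10' := h10 g hent
  -- PATH A: the latch of the pass loop, by induction on `7 − pass`
  have a24 : ∀ d pass, pass + d = 7 → ∀ v, At24 u₀ g pass v →
      ReachVia Lay μ WayInv v (Returned (conv u₀) g.spec g.e g.ret) := by
    intro d
    induction d with
    | zero =>
      intro pass hp v hv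
      refine (h3b pass v hv).trans ?_
      intro v' hv'
      rcases hv' with h | h | h
      · exact e32 v' h
      · have := h.loop.path.pass_le
        omega
      · have := h.loop.path.pass_le
        omega
    | succ d ih =>
      intro pass hp v hv
      refine (h3b pass v hv).trans ?_
      intro v' hv'
      rcases hv' with h | h | h
      · exact e32 v' h
      · refine (h4a (pass + 1) 0 0 v' h).trans ?_
        intro v'' hv''
        rcases hv'' with ⟨h0, _⟩ | h' | h'
        · omega
        · exact ih (pass + 1) (by omega) v'' h'
        · exact e32 v'' h'
      · refine (h6a (pass + 1) 0 0 v' h).trans ?_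
        intro v'' hv''
        rcases hv'' with ⟨h0, _⟩ | h' | h'
        · omega
        · exact ih (pass + 1) (by omega) v'' h'
        · exact e32 v'' h'
  have a24' : ∀ pass v, At24 u₀ g pass v → ReachVia Lay μ WayInv v (Returned (conv u₀) g.spec g.e g.ret) := by
    intro pass v hv
    have hle := hv.path.pass_le
    exact a24 (7 - pass) pass (by omega) v hv
  -- PATH A, ch = 2, pass 0: DECODE #1, by induction on `PRD − pcount`
  have a10 : ∀ n cs pc, g.PRD - pc ≤ n → ∀ v, At10 u₀ g cs pc v →
      ReachVia Lay μ WayInv v (Returned (conv u₀) g.spec g.e g.ret) := by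
    intro n
    induction n with
    | zero =>
      intro cs pc hn v hv
      have := hv.loop.lt
      omega
    | succ n ih =>
      intro cs pc hn v hv
      refine (h5' cs pc v hv).trans ?_
      intro v' hv'
      rcases hv' with h | h
      · refine (h4b 0 cs pc v' h).trans ?_
        intro v'' hv''
        rcases hv'' with ⟨_, cs', pc', hlt, h'⟩ | h' | h'
        · have := h'.loop.lt
          exact ih cs' pc' (by omega) v'' h'
        · exact a24' 0 v'' h'
        · exact e32 v'' h'
      · exact e37 v' h
  -- PATH A, ch > 2, pass 0: DECODE #2
  have a17 : ∀ n cs pc, g.PRD - pc ≤ n → ∀ v, At17 u₀ g cs pc v →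
      ReachVia Lay μ WayInv v (Returned (conv u₀) g.spec g.e g.ret) := by
    intro n
    induction n with
    | zero =>
      intro cs pc hn v hv
      have := hv.loop.lt
      omega
    | succ n ih =>
      intro cs pc hn v hv
      refine (h7' cs pc v hv).trans ?_
      intro v' hv'
      rcases hv' with h | h
      · refine (h6b 0 cs pc v' h).trans ?_
        intro v'' hv''
        rcases hv'' with ⟨_, cs', pc', hlt, h'⟩ | h' | h'
        · have := h'.loop.lt
          exact ih cs' pc' (by omega) v'' h'
        · exact a24' 0 v'' h'
        · exact e32 v'' h'
      · exact e38 v' h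
  -- PATH A: from the dispatch
  have a8 : ∀ v, At8 u₀ g v → ReachVia Lay μ WayInv v (Returned (conv u₀) g.spec g.e g.ret) := by
    intro v hv
    refine (h3a v hv).trans ?_
    intro v' hv'
    rcases hv' with h | h | h
    · exact e32 v' h
    · refine (h4a 0 0 0 v' h).trans ?_
      intro v'' hv''
      rcases hv'' with ⟨_, h'⟩ | h' | h'
      · exact a10 (g.PRD - 0) 0 0 (Nat.le_refl _) v'' h'
      · exact a24' 0 v'' h'
      · exact e32 v'' h'
    · refine (h6a 0 0 0 v' h).trans ?_
      intro v'' hv''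
      rcases hv'' with ⟨_, h'⟩ | h' | h'
      · exact a17 (g.PRD - 0) 0 0 (Nat.le_refl _) v'' h'
      · exact a24' 0 v'' h'
      · exact e32 v'' h'
  -- PATH B: one pass, given the next pass; the measure is `4·(PRD − pcount) + stage`
  have bpass : ∀ p,
      (∀ v, At30 u₀ g (p + 1) 0 0 0 v → ReachVia Lay μ WayInv v (Returned (conv u₀) g.spec g.e g.ret)) →
      ∀ n,
        (∀ cs i pc v, At30 u₀ g p cs i pc v → (g.PRD - pc) * 4 + 1 ≤ n →
          ReachVia Lay μ WayInv v (Returned (conv u₀) g.spec g.e g.ret)) ∧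
        (∀ cs i pc v, At34 u₀ g p cs i pc v → (g.PRD - pc) * 4 ≤ n →
          ReachVia Lay μ WayInv v (Returned (conv u₀) g.spec g.e g.ret)) ∧
        (p = 0 → ∀ cs pc v, At28 u₀ g cs pc v → (g.PRD - pc) * 4 + 3 ≤ n →
          ReachVia Lay μ WayInv v (Returned (conv u₀) g.spec g.e g.ret)) ∧
        (p = 0 → ∀ cs pc v, At29 u₀ g cs pc v → (g.PRD - pc) * 4 + 2 ≤ n →
          ReachVia Lay μ WayInv v (Returned (conv u₀) g.spec g.e g.ret)) := by
    intro p next n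
    induction n with
    | zero =>
      refine ⟨?_, ?_, ?_, ?_⟩
      · intro cs i pc v hv hn
        omega
      · intro cs i pc v hv hn
        have := hv.loop.lt
        omega
      · intro hp cs pc v hv hn
        omega
      · intro hp cs pc v hv hn
        omega
    | succ n ih =>
      obtain ⟨ih30, ih34, ih28, ih29⟩ := ih
      refine ⟨?_, ?_, ?_, ?_⟩
      · intro cs i pc v hv hn
        refine (h10' p cs i pc v hv).trans ?_
        intro v' hv'
        rcases hv' with h | h
        · exact ih34 cs i pc v' h (by omega)
        · exact e32 v' h
      · intro cs i pc v hv hn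
        have hlt := hv.loop.lt
        refine (h8c p cs i pc v hv).trans ?_
        intro v' hv'
        rcases hv' with h | ⟨hp, h⟩ | ⟨hp, h⟩ | h | h
        · exact ih30 cs (i + 1) (pc + 1) v' h (by omega)
        · exact ih28 hp (cs + 1) (pc + 1) v' h (by omega)
        · exact ih30 (cs + 1) 0 (pc + 1) v' h (by omega)
        · exact next v' h
        · exact e36 v' h
      · intro hp cs pc v hv hn
        refine (h9' cs pc v hv).trans ?_
        intro v' hv'
        rcases hv' with h | h
        · exact ih29 hp cs pc v' h (by omega)
        · exact e39 v' h
      · intro hp cs pc v hv hn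
        refine (h8b cs pc v hv).trans ?_
        intro v' hv'
        subst hp
        exact ih30 cs 0 pc v' hv' (by omega)
  -- PATH B: the first i-loop body of every pass, by induction on `7 − pass`
  have b30 : ∀ d p, p + d = 7 → ∀ cs i pc v, At30 u₀ g p cs i pc v →
      ReachVia Lay μ WayInv v (Returned (conv u₀) g.spec g.e g.ret) := by
    intro d
    induction d with
    | zero =>
      intro p hp cs i pc v hv
      have next : ∀ v, At30 u₀ g (p + 1) 0 0 0 v → ReachVia Lay μ WayInv v (Returned (conv u₀) g.spec g.e g.ret) := by
        intro v' hv'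
        have := hv'.loop.pass_le
        omega
      exact (bpass p next ((g.PRD - pc) * 4 + 1)).1 cs i pc v hv (Nat.le_refl _)
    | succ d ih =>
      intro p hp cs i pc v hv
      have next : ∀ v, At30 u₀ g (p + 1) 0 0 0 v → ReachVia Lay μ WayInv v (Returned (conv u₀) g.spec g.e g.ret) :=
        fun v' hv' => ih (p + 1) (by omega) 0 0 0 v' hv'
      exact (bpass p next ((g.PRD - pc) * 4 + 1)).1 cs i pc v hv (Nat.le_refl _)
  -- PATH B: from the dispatch
  have a5 : ∀ v, At5 u₀ g v → ReachVia Lay μ WayInv v (Returned (conv u₀) g.spec g.e g.ret) := by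
    intro v hv
    refine (h8a v hv).trans ?_
    intro v' hv'
    rcases hv' with h | h
    · have next : ∀ v, At30 u₀ g (0 + 1) 0 0 0 v → ReachVia Lay μ WayInv v (Returned (conv u₀) g.spec g.e g.ret) :=
        fun v'' hv'' => b30 6 1 (by omega) 0 0 0 v'' hv''
      exact (bpass 0 next ((g.PRD - 0) * 4 + 3)).2.2.1 rfl 0 0 v' h (Nat.le_refl _)
    · exact e36 v' h
  -- the whole function
  refine (h1 g hent).trans ?_
  intro v hv
  refine (h2 g hent v hv).trans ?_
  intro v' hv'
  rcases hv' with h | h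
  · exact a8 v' h
  · exact a5 v' h

end Vorbis.Spec.Worked.decode_residue_COMPOSITION

/-- **The statement of the unit `decode_residue.COMPOSITION`, proved.** -/
theorem Vorbis.Spec.Worked.decode_residue_COMPOSITION_ok : Vorbis.Spec.decode_residue_COMPOSITION.Statement := by
  intro Lay _hLay μ _hμ u₀ h1 h2 h3 h4 h5 h6 h7 h8 h9 h10 h11 len A others frames stored room ysz u ret he hpre
  exact Vorbis.Spec.Worked.decode_residue_COMPOSITION.decode_residue_composes_w Lay μ u₀ h1 h2 h3 h4 h5 h6 h7 h8 h9 h10 h11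
    ⟨len, A, others, frames, stored, room, ysz, u, ret⟩ ⟨he, hpre⟩
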